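-- pv_equiv track=rewrite | github.com/mw197hub/codingame | medium/Mosaic/main.py | getMaxWert
-- ===== SOURCE A (Python) =====
-- def getMaxWert(y,x,breite):
--     wert=0
--     for y1 in range(y-1,y+2,1):
--         for x1 in range(x-1,x+2,1):
--             if y1 < 0 or x1 < 0 or y1 >= breite or x1 >= breite:
--                 continue
--             else:
--                 wert+=1
--     return wert
-- ===== SOURCE B (Python) =====
-- def getMaxWert(y, x, breite):
--     rows = max(0, min(breite - 1, y + 1) - max(0, y - 1) + 1)
--     cols = max(0, min(breite - 1, x + 1) - max(0, x - 1) + 1)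
--     return rows * cols
-- ===== Notes on version B (the rewrite author's own statement) =====
-- stated objective: simpler
-- what changed: Replaced the 3x3 nested loop count with a closed-form product of the clipped row-span and column-span lengths.
import Mathlib
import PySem

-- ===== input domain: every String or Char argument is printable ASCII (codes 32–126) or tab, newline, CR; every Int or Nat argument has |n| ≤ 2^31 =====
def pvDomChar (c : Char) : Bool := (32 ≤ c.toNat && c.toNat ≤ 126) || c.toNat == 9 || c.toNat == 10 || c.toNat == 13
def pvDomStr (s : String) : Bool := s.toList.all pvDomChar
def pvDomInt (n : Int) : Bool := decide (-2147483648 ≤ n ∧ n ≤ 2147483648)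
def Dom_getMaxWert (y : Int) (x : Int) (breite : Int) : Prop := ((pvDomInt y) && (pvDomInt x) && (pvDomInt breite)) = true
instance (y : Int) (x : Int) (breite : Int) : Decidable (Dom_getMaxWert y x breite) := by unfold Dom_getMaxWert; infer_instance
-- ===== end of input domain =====

-- B replaces A's 3x3 nested-loop count by a closed-form product of two clipped 1-D span lengths (objective: simpler).

-- ===== PORT A =====
def getMaxWert (y : Int) (x : Int) (breite : Int) : Int :=
  (PySem.List.pyRange (y-1) (y+2) 1).foldl (fun wert y1 =>
    (PySem.List.pyRange (x-1) (x+2) 1).foldl (fun wert x1 =>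
      if y1 < 0 ∨ x1 < 0 ∨ y1 ≥ breite ∨ x1 ≥ breite then wert else wert + 1) wert) 0

-- ===== PORT B =====
def getMaxWert_alt (y : Int) (x : Int) (breite : Int) : Int :=
  let rows := max 0 (min (breite - 1) (y + 1) - max 0 (y - 1) + 1)
  let cols := max 0 (min (breite - 1) (x + 1) - max 0 (x - 1) + 1)
  rows * cols

-- ===== PRECONDITION & SPEC =====
def Spec_getMaxWert (y : Int) (x : Int) (breite : Int) (out : Int) : Prop := out = getMaxWert_alt y x breite
instance (y : Int) (x : Int) (breite : Int) (out : Int) : Decidable (Spec_getMaxWert y x breite out) := by unfold Spec_getMaxWert; infer_instance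

-- ===== CLAIM (what is proved, stated in full; the proofs are below) =====
def Claim_equal_getMaxWert : Prop := ∀ (y : Int) (x : Int) (breite : Int), Dom_getMaxWert y x breite → Spec_getMaxWert y x breite (getMaxWert y x breite)

-- ===== LEMMAS AND PROOFS =====

-- range(a-1, a+2) is exactly the three integers a-1, a, a+1
theorem pyRange3 (a : Int) : PySem.List.pyRange (a-1) (a+2) 1 = [a-1, a, a+1] := by
  have h3 : (a + 2 - (a - 1)).toNat = 3 := by omega
  rw [PySem.List.pyRange_one, h3]
  simp [List.range_succ]
  omega

-- 0/1 indicator of being inside [0, breite)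
def ind (breite t : Int) : Int := if 0 ≤ t ∧ t < breite then 1 else 0

-- the inner x-loop adds (indicator of y1 in range) * (number of x1 in range)
theorem inner_eq (x breite y1 w : Int) :
    ((PySem.List.pyRange (x-1) (x+2) 1).foldl (fun wert x1 =>
      if y1 < 0 ∨ x1 < 0 ∨ y1 ≥ breite ∨ x1 ≥ breite then wert else wert + 1) w)
    = w + ind breite y1 * (ind breite (x-1) + ind breite x + ind breite (x+1)) := by
  rw [pyRange3]
  simp only [List.foldl, ind]
  split_ifs <;> ring_nf <;> omega

-- the three-element indicator sum equals the clipped span length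
theorem span_eq (breite a : Int) :
    ind breite (a-1) + ind breite a + ind breite (a+1)
    = max 0 (min (breite - 1) (a + 1) - max 0 (a - 1) + 1) := by
  simp only [ind]
  split_ifs <;> omega

-- ===== VERDICT (by name: the statement is the Claim_ definition above) =====
theorem getMaxWert_spec : Claim_equal_getMaxWert := by
  intro y x breite _
  show getMaxWert y x breite = getMaxWert_alt y x breite
  unfold getMaxWert getMaxWert_alt
  rw [pyRange3 y]
  simp only [List.foldl, inner_eq]
  rw [show (0:Int) + ind breite (y-1) * (ind breite (x-1) + ind breite x + ind breite (x+1))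
        + ind breite y * (ind breite (x-1) + ind breite x + ind breite (x+1))
        + ind breite (y+1) * (ind breite (x-1) + ind breite x + ind breite (x+1))
      = (ind breite (y-1) + ind breite y + ind breite (y+1))
        * (ind breite (x-1) + ind breite x + ind breite (x+1)) by ring]
  rw [span_eq, span_eq]
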